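-- pv_equiv track=rewrite | github.com/scorum/scorumapi-py | metrics/gatherapp.py | get_range_for_runners
-- ===== SOURCE A (Python) =====
-- import math
--
-- API_LIMIT = 100
--
-- def get_range_for_runners(start_block, end_block, hosts, limit=API_LIMIT):
--     assert end_block > start_block
--
--     result = list()
--     total_blocks = end_block - start_block + 1
--
--     number_of_queries = max(1, int(math.ceil(total_blocks / limit)))
--     number_of_workers = min(number_of_queries, len(hosts))
--
--     blocks_per_reader = int(total_blocks / number_of_workers)
--
--     assert blocks_per_reader > 0
--
--     for i in range(number_of_workers - 1):
--         result.append((start_block, start_block + blocks_per_reader, hosts[i]))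
--         start_block += blocks_per_reader
--
--     result.append((start_block, end_block, hosts[-1]))
--
--     return result
-- ===== SOURCE B (Python) =====
-- import math
--
-- API_LIMIT = 100
--
-- def _split(s, hs, k, bpr, end_block, last_host):
--     # recursive descent: peel one host, shrink the range, cons the chunk
--     if k == 1:
--         return [(s, end_block, last_host)]
--     return [(s, s + bpr, hs[0])] + _split(s + bpr, hs[1:], k - 1, bpr, end_block, last_host)
--
-- def get_range_for_runners(start_block, end_block, hosts, limit=API_LIMIT):
--     assert end_block > start_block
--
--     total_blocks = end_block - start_block + 1
--     number_of_queries = max(1, int(math.ceil(total_blocks / limit)))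
--     number_of_workers = min(number_of_queries, len(hosts))
--     blocks_per_reader = int(total_blocks / number_of_workers)
--     assert blocks_per_reader > 0
--
--     return _split(start_block, hosts, number_of_workers,
--                   blocks_per_reader, end_block, hosts[-1])
-- ===== Notes on version B (the rewrite author's own statement) =====
-- stated objective: alternative
-- what changed: Replaces A's indexed loop that mutates start_block and appends to a shared list by a recursive descent that consumes the hosts list structurally (peel the head host, shrink the range, cons the chunk), with the last remaining worker taking the tail of the range.
import Mathlib
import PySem

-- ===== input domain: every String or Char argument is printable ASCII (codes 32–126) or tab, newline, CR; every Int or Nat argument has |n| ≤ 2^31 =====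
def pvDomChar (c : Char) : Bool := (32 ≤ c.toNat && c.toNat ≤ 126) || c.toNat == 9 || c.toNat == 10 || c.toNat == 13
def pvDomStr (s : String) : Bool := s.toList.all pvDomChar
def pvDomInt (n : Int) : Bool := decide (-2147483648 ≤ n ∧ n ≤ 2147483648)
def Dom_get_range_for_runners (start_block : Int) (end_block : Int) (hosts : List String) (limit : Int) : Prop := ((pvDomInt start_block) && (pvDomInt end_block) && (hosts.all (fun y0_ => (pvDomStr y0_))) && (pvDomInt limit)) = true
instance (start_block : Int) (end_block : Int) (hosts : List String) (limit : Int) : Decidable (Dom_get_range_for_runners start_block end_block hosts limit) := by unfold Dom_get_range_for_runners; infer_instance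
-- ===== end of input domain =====

-- B replaces A's indexed accumulating loop by a recursive descent that consumes the
-- hosts list structurally, shrinking the range and consing one chunk per host (alternative decomposition).

-- ===== PORT A =====
def get_range_for_runners (start_block : Int) (end_block : Int) (hosts : List String) (limit : Int) : List (Int × Int × String) :=
  -- float divisions are exact on Dom (|values| ≤ 2^32 < 2^53):
  -- int(math.ceil(t / l)) = -((-t) // l)  and  int(t / w) = truncdiv t w
  let total_blocks := end_block - start_block + 1
  let number_of_queries := max 1 (-(PySem.Int.floordiv (-total_blocks) limit))
  let number_of_workers := min number_of_queries (hosts.length : Int)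
  let blocks_per_reader := PySem.Int.truncdiv total_blocks number_of_workers
  let st := (PySem.List.pyRange 0 (number_of_workers - 1) 1).foldl
    (fun (st : List (Int × Int × String) × Int) i =>
      (st.1 ++ [(st.2, st.2 + blocks_per_reader, PySem.List.pyGetD hosts i "")],
       st.2 + blocks_per_reader))
    ([], start_block)
  st.1 ++ [(st.2, end_block, PySem.List.pyGetD hosts (-1) "")]

-- ===== PORT B =====
-- port of Source B's _split: recursion on the worker count, consuming the hosts list
def grr_split (end_block : Int) (bpr : Int) (last_host : String) :
    Int → List String → Nat → List (Int × Int × String)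
  | s, _, 0 => [(s, end_block, last_host)]
  | s, _, 1 => [(s, end_block, last_host)]
  | s, hs, (k+2) =>
      (s, s + bpr, PySem.List.pyGetD hs 0 "") ::
        grr_split end_block bpr last_host (s + bpr) (PySem.List.slice hs (some 1) none) (k+1)

def get_range_for_runners_alt (start_block : Int) (end_block : Int) (hosts : List String) (limit : Int) : List (Int × Int × String) :=
  let total_blocks := end_block - start_block + 1
  let number_of_queries := max 1 (-(PySem.Int.floordiv (-total_blocks) limit))
  let number_of_workers := min number_of_queries (hosts.length : Int)
  let blocks_per_reader := PySem.Int.truncdiv total_blocks number_of_workers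
  grr_split end_block blocks_per_reader (PySem.List.pyGetD hosts (-1) "")
    start_block hosts number_of_workers.toNat

-- ===== PRECONDITION & SPEC =====
-- Pre_ excludes exactly the inputs where Python A raises: AssertionError when end_block ≤ start_block,
-- ZeroDivisionError when hosts is empty or limit == 0.
def Pre_get_range_for_runners (start_block : Int) (end_block : Int) (hosts : List String) (limit : Int) : Prop :=
  start_block < end_block ∧ hosts ≠ [] ∧ limit ≠ 0
instance (start_block : Int) (end_block : Int) (hosts : List String) (limit : Int) : Decidable (Pre_get_range_for_runners start_block end_block hosts limit) := by unfold Pre_get_range_for_runners; infer_instance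
def pvWitness_get_range_for_runners : Int × Int × List String × Int := (1, 10, ["h1", "h2"], 3)

def Spec_get_range_for_runners (start_block : Int) (end_block : Int) (hosts : List String) (limit : Int) (out : List (Int × Int × String)) : Prop := out = get_range_for_runners_alt start_block end_block hosts limit
instance (start_block : Int) (end_block : Int) (hosts : List String) (limit : Int) (out : List (Int × Int × String)) : Decidable (Spec_get_range_for_runners start_block end_block hosts limit out) := by unfold Spec_get_range_for_runners; infer_instance

-- ===== CLAIM (what is proved, stated in full; the proofs are below) =====
def Claim_equal_get_range_for_runners : Prop := ∀ (start_block : Int) (end_block : Int) (hosts : List String) (limit : Int), Dom_get_range_for_runners start_block end_block hosts limit → Pre_get_range_for_runners start_block end_block hosts limit → Spec_get_range_for_runners start_block end_block hosts limit (get_range_for_runners start_block end_block hosts limit)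

-- ===== LEMMAS AND PROOFS =====
-- A's loop characterised: k iterations append the k leading chunks and advance the cursor by k*b
lemma grr_loopA (hosts : List String) (b : Int) :
    ∀ (k : Nat) (s : Int) (acc : List (Int × Int × String)),
      (PySem.List.pyRange 0 (k : Int) 1).foldl
        (fun (st : List (Int × Int × String) × Int) i =>
          (st.1 ++ [(st.2, st.2 + b, PySem.List.pyGetD hosts i "")], st.2 + b))
        (acc, s)
      = (acc ++ (List.range k).map
            (fun (j : Nat) => (s + (j : Int) * b, s + ((j : Int) + 1) * b, hosts.getD j "")),
         s + k * b) := by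
  intro k
  induction k with
  | zero => intro s acc; simp [PySem.List.pyRange_one_eq_nil]
  | succ k ih =>
    intro s acc
    rw [show ((k + 1 : Nat) : Int) = (k : Int) + 1 by push_cast; ring,
        PySem.List.pyRange_one_succ_right (by positivity), List.foldl_append, ih]
    simp only [List.foldl_cons, List.foldl_nil, List.range_succ, List.map_append, List.map_cons,
      List.map_nil, List.append_assoc, PySem.List.pyGetD_natCast, Prod.mk.injEq]
    refine ⟨?_, by ring⟩
    congr 2
    simp only [List.cons.injEq, and_true, Prod.mk.injEq]
    exact ⟨trivial, by ring⟩

lemma getD_tail (hs : List String) (j : Nat) : hs.tail.getD j "" = hs.getD (j + 1) "" := by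
  cases hs <;> simp [List.getD]

-- B's recursion characterised by the same chunk list
lemma grr_splitB (e b : Int) (last : String) :
    ∀ (k : Nat) (s : Int) (hs : List String),
      grr_split e b last s hs (k + 1)
      = (List.range k).map
            (fun (j : Nat) => (s + (j : Int) * b, s + ((j : Int) + 1) * b, hs.getD j ""))
        ++ [(s + (k : Int) * b, e, last)] := by
  intro k
  induction k with
  | zero => intro s hs; simp [grr_split]
  | succ k ih =>
    intro s hs
    show (s, s + b, PySem.List.pyGetD hs 0 "") :: grr_split e b last (s + b) (PySem.List.slice hs (some 1) none) (k + 1) = _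
    rw [PySem.List.slice_from_one, ih]
    rw [List.range_succ_eq_map, List.map_cons, List.map_map]
    simp only [List.cons_append, List.cons.injEq, Prod.mk.injEq, Nat.cast_zero]
    refine ⟨⟨by ring, by ring, ?_⟩, ?_⟩
    · rw [show (0 : Int) = ((0 : Nat) : Int) by norm_num, PySem.List.pyGetD_natCast]
    · congr 1
      · apply List.map_congr_left
        intro j _
        simp only [Function.comp_apply, getD_tail, Prod.mk.injEq]
        constructor
        · push_cast; ring
        · constructor
          · push_cast; ring
          · trivial
      · simp only [List.cons.injEq, and_true, Prod.mk.injEq]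
        push_cast; ring

-- ===== VERDICT (by name: the statement is the Claim_ definition above) =====
theorem get_range_for_runners_spec : Claim_equal_get_range_for_runners := by
  intro start_block end_block hosts limit hdom hpre
  obtain ⟨hlt, hne, hl0⟩ := hpre
  unfold Spec_get_range_for_runners
  simp only [get_range_for_runners, get_range_for_runners_alt]
  set n := min (max 1 (-PySem.Int.floordiv (-(end_block - start_block + 1)) limit)) (hosts.length : Int) with hn
  set b := PySem.Int.truncdiv (end_block - start_block + 1) n with hb
  have hlen : 1 ≤ (hosts.length : Int) := by
    have : hosts.length ≠ 0 := by simpa [List.length_eq_zero_iff] using hne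
    omega
  have hn1 : 1 ≤ n := by
    have : (1 : Int) ≤ max 1 (-PySem.Int.floordiv (-(end_block - start_block + 1)) limit) :=
      le_max_left _ _
    have := min_le_right (max 1 (-PySem.Int.floordiv (-(end_block - start_block + 1)) limit)) (hosts.length : Int)
    omega
  obtain ⟨k, hk⟩ : ∃ k : Nat, n = (k : Int) + 1 := ⟨(n - 1).toNat, by omega⟩
  rw [show n - 1 = (k : Int) by omega,
      grr_loopA hosts b k start_block [],
      show n.toNat = k + 1 by omega,
      grr_splitB end_block b (PySem.List.pyGetD hosts (-1) "") k start_block hosts]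
  simp
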